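-- pv_equiv track=rewrite | github.com/rrrafet/iceman | schema.py | _generate_traversal_order
-- ===== SOURCE A (Python) =====
-- from typing import Dict, List, Optional, Any, Union
--
-- def _generate_traversal_order(root: str, relationships: Dict[str, Dict[str, Any]]) -> List[str]:
--     """Generate breadth-first traversal order of the hierarchy."""
--     traversal = []
--     queue = [root]
--     visited = set()
--
--     while queue:
--         current = queue.pop(0)
--         if current not in visited:
--             visited.add(current)
--             traversal.append(current)
--
--             # Add children to queue
--             if current in relationships and "children" in relationships[current]:
--                 children = relationships[current]["children"]
--                 if children:
--                     queue.extend(children)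
--
--     return traversal
-- ===== SOURCE B (Python) =====
-- def _generate_traversal_order(root, relationships):
--     """BFS with a cursor into the traversal itself: children are screened and
--     marked visited at enqueue time, so the traversal list doubles as the queue
--     (no pop(0) shifting, no duplicate entries, children lists resolved once)."""
--     childmap = {k: (v.get("children") or []) for k, v in relationships.items()}
--     traversal = [root]
--     visited = {root}
--     i = 0
--     while i < len(traversal):
--         cur = traversal[i]
--         i += 1
--         for child in childmap.get(cur, []):
--             if child not in visited:
--                 visited.add(child)
--                 traversal.append(child)
--     return traversal
-- ===== Notes on version B (the rewrite author's own statement) =====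
-- stated objective: alternative
-- what changed: Replaced the pop(0) queue with dequeue-time visited checks by a cursor that walks the traversal list itself, screening and marking children once at enqueue time from a children map precomputed in a single pass, so the queue never holds duplicates and no list shifting occurs.
import Mathlib
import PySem

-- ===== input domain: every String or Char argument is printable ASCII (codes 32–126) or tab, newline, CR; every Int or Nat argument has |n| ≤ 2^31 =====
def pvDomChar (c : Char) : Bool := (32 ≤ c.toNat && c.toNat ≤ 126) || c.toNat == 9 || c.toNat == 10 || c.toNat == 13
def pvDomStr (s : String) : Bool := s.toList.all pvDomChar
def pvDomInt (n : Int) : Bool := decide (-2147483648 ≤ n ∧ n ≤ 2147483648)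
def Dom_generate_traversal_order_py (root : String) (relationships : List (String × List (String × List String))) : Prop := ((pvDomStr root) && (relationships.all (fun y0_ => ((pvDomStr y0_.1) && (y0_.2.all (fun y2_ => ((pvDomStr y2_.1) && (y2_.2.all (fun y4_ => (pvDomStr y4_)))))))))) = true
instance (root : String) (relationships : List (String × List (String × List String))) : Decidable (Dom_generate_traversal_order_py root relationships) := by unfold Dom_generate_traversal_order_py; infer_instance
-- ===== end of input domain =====

-- B replaces A's pop(0) queue (dequeue-time visited check, duplicates allowed in the
-- queue) by a cursor over the traversal list itself, with children resolved through a
-- child map precomputed in one pass and screened/marked at enqueue time; same order,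
-- proved equal on all inputs.

-- ===== PORT A =====
-- `current in relationships and "children" in relationships[current]` + the extend value
def pvChildren (relationships : List (String × List (String × List String))) (current : String) : List String :=
  let d := PySem.Dict.ofList relationships
  if d.contains current then
    let e := PySem.Dict.ofList ((d.get? current).getD [])
    if e.contains "children" then (e.get? "children").getD [] else []
  else []

-- potential: total length of children lists of not-yet-visited dict keys (termination measure only)
def pvPhi (relationships : List (String × List (String × List String))) (visited : PySem.Set String) : Nat :=
  (((PySem.Dict.ofList relationships).keys.filter
      (fun k => !(PySem.Set.contains visited k))).map
      (fun k => (pvChildren relationships k).length)).sum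

lemma pvChildren_of_not_contains (relationships : List (String × List (String × List String)))
    (cur : String) (h : (PySem.Dict.ofList relationships).contains cur = false) :
    pvChildren relationships cur = [] := by
  simp [pvChildren, h]

lemma pv_filter_sum_split (l : List String) (hl : l.Nodup) (p : String → Bool) (cur : String)
    (w : String → Nat) :
    ((l.filter p).map w).sum
      = ((l.filter (fun k => p k && !(k == cur))).map w).sum
        + (if cur ∈ l ∧ p cur = true then w cur else 0) := by
  induction l with
  | nil => simp
  | cons x xs ih =>
    rcases List.nodup_cons.mp hl with ⟨hx, hxs⟩
    rw [List.filter_cons, List.filter_cons]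
    by_cases hxc : x = cur
    · subst hxc
      have hfc : xs.filter (fun k => p k && !(k == x)) = xs.filter p := by
        apply List.filter_congr
        intro a ha
        have : a ≠ x := fun h => hx (h ▸ ha)
        simp [this]
      by_cases hp : p x = true
      · simp [hp, hx, hfc]
        omega
      · simp [hp, hfc]
    · have hxlit : (x == cur) = false := by simp [hxc]
      have hmem : (cur ∈ x :: xs ∧ p cur = true) ↔ (cur ∈ xs ∧ p cur = true) := by
        simp [List.mem_cons]
        intro h; exact fun heq => absurd heq.symm hxc
      by_cases hp : p x = true
      · simp only [hp, hxlit, Bool.not_false, Bool.and_true, if_true, List.map_cons,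
          List.sum_cons, ih hxs]
        rw [if_congr hmem rfl rfl]
        omega
      · have hp' : p x = false := by simpa using hp
        simp only [hp', Bool.false_eq_true, if_false, Bool.false_and]
        rw [ih hxs, if_congr hmem rfl rfl]

lemma pvPhi_add (relationships : List (String × List (String × List String)))
    (visited : PySem.Set String) (cur : String)
    (h : PySem.Set.contains visited cur = false) :
    pvPhi relationships (PySem.Set.add visited cur) + (pvChildren relationships cur).length
      = pvPhi relationships visited := by
  unfold pvPhi
  have hmem : cur ∉ visited := by simpa using h
  have hadd : PySem.Set.add visited cur = visited ++ [cur] :=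
    PySem.Set.add_of_not_mem hmem
  have hfilter :
      ((PySem.Dict.ofList relationships).keys.filter
        (fun k => !(PySem.Set.contains (visited ++ [cur]) k)))
      = ((PySem.Dict.ofList relationships).keys.filter
        (fun k => (!(PySem.Set.contains visited k)) && !(k == cur))) := by
    apply List.filter_congr
    intro a _
    simp [PySem.Set.contains, beq_eq_decide, Bool.not_or]
  rw [hadd, hfilter,
    pv_filter_sum_split _ (PySem.Dict.nodup_keys_ofList relationships)
      (fun k => !(PySem.Set.contains visited k)) cur
      (fun k => (pvChildren relationships k).length)]
  by_cases hk : cur ∈ (PySem.Dict.ofList relationships).keys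
  · simp [hk, hmem]
  · have hnc : (PySem.Dict.ofList relationships).contains cur = false :=
      Bool.eq_false_iff.mpr
        (fun h' => hk ((PySem.Dict.contains_iff_mem_keys _ _).mp h'))
    simp [hk, pvChildren_of_not_contains _ _ hnc]

-- `while queue: current = queue.pop(0); …`
def pvRunA (relationships : List (String × List (String × List String))) :
    List String → PySem.Set String → List String → List String
  | [], _, traversal => traversal
  | current :: rest, visited, traversal =>
    if PySem.Set.contains visited current then
      pvRunA relationships rest visited traversal
    else
      let children := pvChildren relationships current
      pvRunA relationships
        (if children ≠ [] then rest ++ children else rest)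
        (PySem.Set.add visited current) (traversal ++ [current])
termination_by q v _ => q.length + pvPhi relationships v
decreasing_by
  · simp
  · rename_i hvis
    have h : PySem.Set.contains visited current = false := by
      simpa using hvis
    have := pvPhi_add relationships visited current h
    split <;> simp <;> omega

def generate_traversal_order_py (root : String) (relationships : List (String × List (String × List String))) : List String :=
  pvRunA relationships [root] PySem.Set.empty []

-- ===== PORT B =====
-- `childmap = {k: (v.get("children") or []) for k, v in relationships.items()}`
def pvChildMap (relationships : List (String × List (String × List String))) :
    PySem.Dict String (List String) :=
  (PySem.Dict.ofList relationships).items.foldl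
    (fun m kv => m.insert kv.1 (((PySem.Dict.ofList kv.2).get? "children").getD []))
    PySem.Dict.empty

-- `for child in childmap.get(cur, []): if child not in visited: …append(child)`
-- (`pend` models `traversal[i:]`, the part of the traversal the cursor has not reached)
def pvEnq (visited : PySem.Set String) (pend : List String) :
    List String → PySem.Set String × List String
  | [] => (visited, pend)
  | c :: cs =>
    if PySem.Set.contains visited c then pvEnq visited pend cs
    else pvEnq (PySem.Set.add visited c) (pend ++ [c]) cs

-- measure helpers for the cursor loop (termination only)
lemma pv_len_filter_lt (p q : String → Bool) (hpq : ∀ u, p u = true → q u = true)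
    (c : String) (hpc : p c = false) (hqc : q c = true) :
    ∀ (U : List String), c ∈ U → (U.filter p).length < (U.filter q).length := by
  intro U
  induction U with
  | nil => intro h; cases h
  | cons u Us ih =>
    intro hc
    rw [List.filter_cons, List.filter_cons]
    rcases List.mem_cons.mp hc with h | h
    · subst h
      rw [hpc, hqc]
      simp only [if_true, Bool.false_eq_true, if_false, List.length_cons]
      have := List.Sublist.length_le (List.monotone_filter_right Us (fun a ha => hpq a ha))
      omega
    · have := ih h
      by_cases hpu : p u = true
      · rw [hpu, hpq u hpu]; simpa using this
      · have hpu' : p u = false := by simpa using hpu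
        rw [hpu']
        by_cases hqu : q u = true
        · rw [hqu]; simp only [Bool.false_eq_true, if_false, if_true, List.length_cons]; omega
        · have hqu' : q u = false := by simpa using hqu
          rw [hqu']; simpa using this

lemma pv_not_mem (w : PySem.Set String) (c : String)
    (h : PySem.Set.contains w c = false) : c ∉ w := fun hm => by
  rw [(PySem.Set.contains_iff w c).mpr hm] at h; cases h

lemma pv_contains_add (w : PySem.Set String) (c y : String)
    (hc : PySem.Set.contains w c = false) :
    PySem.Set.contains (PySem.Set.add w c) y = (PySem.Set.contains w y || (y == c)) := by
  simp [PySem.Set.add, PySem.Set.contains, pv_not_mem w c hc, beq_eq_decide]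

lemma pvEnq_measure (U : List String) :
    ∀ (cs : List String) (w : PySem.Set String) (pend : List String),
      (∀ c ∈ cs, c ∈ U) →
      (pvEnq w pend cs).2.length
          + 2 * ((U.filter (fun u => !PySem.Set.contains (pvEnq w pend cs).1 u)).length)
        ≤ pend.length + 2 * ((U.filter (fun u => !PySem.Set.contains w u)).length) := by
  intro cs
  induction cs with
  | nil => intro w pend _; simp [pvEnq]
  | cons c cs ih =>
    intro w pend hU
    rw [pvEnq]
    by_cases hc : PySem.Set.contains w c = true
    · rw [if_pos hc]; exact ih w pend (fun x hx => hU x (List.mem_cons_of_mem _ hx))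
    · have hc' : PySem.Set.contains w c = false := by simpa using hc
      rw [if_neg (by simp [PySem.Set.contains, pv_not_mem w c hc'])]
      have step := ih (PySem.Set.add w c) (pend ++ [c])
        (fun x hx => hU x (List.mem_cons_of_mem _ hx))
      have hlt : ((U.filter (fun u => !PySem.Set.contains (PySem.Set.add w c) u)).length)
          < ((U.filter (fun u => !PySem.Set.contains w u)).length) := by
        apply pv_len_filter_lt _ _ _ c _ _ U (hU c (List.mem_cons_self))
        · intro u hu
          rw [pv_contains_add w c u hc'] at hu
          simp only [Bool.not_or, Bool.and_eq_true, Bool.not_eq_true'] at hu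
          simpa using pv_not_mem w u hu.1
        · simp [pv_contains_add w c c hc']
        · simp [PySem.Set.contains, pv_not_mem w c hc']
      simp only [List.length_append, List.length_singleton] at step ⊢
      omega

-- `i = 0; while i < len(traversal): cur = traversal[i]; i += 1; …`
def pvRunB (childmap : PySem.Dict String (List String)) :
    List String → PySem.Set String → List String → List String
  | [], _, done => done
  | cur :: rest, visited, done =>
    let r := pvEnq visited rest ((childmap.get? cur).getD [])
    pvRunB childmap r.2 r.1 (done ++ [cur])
termination_by pend w _ =>
  pend.length + 2 * ((childmap.values.flatten.filter (fun u => !PySem.Set.contains w u)).length)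
decreasing_by
  have hsub : ∀ c ∈ (childmap.get? cur).getD [], c ∈ childmap.values.flatten := by
    intro c hcmem
    cases hg : childmap.get? cur with
    | none => rw [hg] at hcmem; cases hcmem
    | some l =>
      rw [hg] at hcmem
      simp only [Option.getD_some] at hcmem
      have : l ∈ childmap.values := by
        simp only [PySem.Dict.get?] at hg
        cases hf : List.find? (fun p => p.1 == cur) childmap.items with
        | none => rw [hf] at hg; cases hg
        | some kv =>
          rw [hf] at hg
          simp only [Option.map_some] at hg
          have hkm := List.mem_of_find?_eq_some hf
          have hl : kv.2 = l := by injection hg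
          simp only [PySem.Dict.values]
          exact hl ▸ List.mem_map_of_mem hkm
      exact List.mem_flatten.mpr ⟨l, this, hcmem⟩
  have := pvEnq_measure childmap.values.flatten ((childmap.get? cur).getD []) visited rest hsub
  simp only [List.length_cons]
  omega

def generate_traversal_order_py_alt (root : String) (relationships : List (String × List (String × List String))) : List String :=
  pvRunB (pvChildMap relationships) [root] (PySem.Set.ofList [root]) []

-- ===== PRECONDITION & SPEC =====
def Spec_generate_traversal_order_py (root : String) (relationships : List (String × List (String × List String))) (out : List String) : Prop := out = generate_traversal_order_py_alt root relationships
instance (root : String) (relationships : List (String × List (String × List String))) (out : List String) : Decidable (Spec_generate_traversal_order_py root relationships out) := by unfold Spec_generate_traversal_order_py; infer_instance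

-- ===== CLAIM (what is proved, stated in full; the proofs are below) =====
def Claim_equal_generate_traversal_order_py : Prop := ∀ (root : String) (relationships : List (String × List (String × List String))), Dom_generate_traversal_order_py root relationships → Spec_generate_traversal_order_py root relationships (generate_traversal_order_py root relationships)

-- ===== LEMMAS AND PROOFS =====

-- the sublist of q that B's enqueue-time screening keeps: first occurrences not in f
def pvStrip (f : String → Bool) : List String → List String
  | [] => []
  | x :: xs => if f x then pvStrip f xs else x :: pvStrip (fun y => f y || (y == x)) xs

lemma pvStrip_congr (l : List String) : ∀ (f g : String → Bool), (∀ y, f y = g y) →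
    pvStrip f l = pvStrip g l := by
  induction l with
  | nil => intros; rfl
  | cons x xs ih =>
    intro f g h
    rw [pvStrip, pvStrip, h x]
    by_cases hg : g x = true
    · rw [if_pos hg, if_pos hg]; exact ih f g h
    · rw [if_neg hg, if_neg hg]
      exact congrArg _ (ih _ _ (fun y => by rw [h y]))

lemma pvStrip_append (a : List String) : ∀ (f : String → Bool) (b : List String),
    pvStrip f (a ++ b) = pvStrip f a ++ pvStrip (fun y => f y || decide (y ∈ pvStrip f a)) b := by
  induction a with
  | nil =>
    intro f b
    simp only [List.nil_append, pvStrip]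
    exact (pvStrip_congr b _ _ (by simp)).symm
  | cons x xs ih =>
    intro f b
    rw [List.cons_append, pvStrip, pvStrip]
    by_cases hf : f x = true
    · rw [if_pos hf, if_pos hf, ih]
    · rw [if_neg hf, if_neg hf, List.cons_append, ih]
      refine congrArg _ (congrArg _ (pvStrip_congr b _ _ (fun y => ?_)))
      simp [List.mem_cons, beq_eq_decide, Bool.or_assoc]

lemma pvEnq_spec : ∀ (cs : List String) (w : PySem.Set String) (pend : List String),
    (pvEnq w pend cs).2 = pend ++ pvStrip (fun y => PySem.Set.contains w y) cs ∧
    ∀ y, PySem.Set.contains (pvEnq w pend cs).1 y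
        = (PySem.Set.contains w y
            || decide (y ∈ pvStrip (fun y => PySem.Set.contains w y) cs)) := by
  intro cs
  induction cs with
  | nil => intro w pend; simp [pvEnq, pvStrip]
  | cons c cs ih =>
    intro w pend
    rw [pvEnq, pvStrip]
    by_cases hc : PySem.Set.contains w c = true
    · rw [if_pos hc, if_pos hc]
      rcases ih w pend with ⟨h1, h2⟩
      exact ⟨h1, h2⟩
    · have hc' : PySem.Set.contains w c = false := by simpa using hc
      rw [if_neg hc, if_neg (by simp [PySem.Set.contains, pv_not_mem w c hc'])]
      rcases ih (PySem.Set.add w c) (pend ++ [c]) with ⟨h1, h2⟩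
      have hstrip : pvStrip (fun y => PySem.Set.contains (PySem.Set.add w c) y) cs
          = pvStrip (fun y => PySem.Set.contains w y || (y == c)) cs :=
        pvStrip_congr cs _ _ (fun y => pv_contains_add w c y hc')
      constructor
      · rw [h1, hstrip, List.append_assoc, List.singleton_append]
      · intro y
        rw [h2 y, hstrip, pv_contains_add w c y hc']
        simp [List.mem_cons, beq_eq_decide, Bool.or_assoc]

-- the precomputed child map agrees pointwise with A's inline children lookup
lemma pv_get?_foldl_ins (g : List (String × List String) → List String) :
    ∀ (l : List (String × List (String × List String)))
      (m : PySem.Dict String (List String)) (x : String),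
      (l.map Prod.fst).Nodup →
      (l.foldl (fun m kv => m.insert kv.1 (g kv.2)) m).get? x
        = ((l.find? (fun kv => kv.1 == x)).map (fun kv => g kv.2)).or (m.get? x) := by
  intro l
  induction l with
  | nil => intro m x _; simp
  | cons kv l ih =>
    intro m x hnd
    rcases List.nodup_cons.mp hnd with ⟨hk, hnd'⟩
    rw [List.foldl_cons, ih _ x hnd', List.find?_cons]
    by_cases hx : kv.1 = x
    · have hfl : l.find? (fun p => p.1 == x) = none := by
        apply List.find?_eq_none.mpr
        intro p hp
        simp only [beq_iff_eq]
        intro hpx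
        apply hk
        rw [hx, ← hpx]
        exact List.mem_map_of_mem hp
      rw [hfl]
      simp [hx, PySem.Dict.get?_insert_self]
    · have : (kv.1 == x) = false := by simp [hx]
      rw [this]
      simp only [Bool.false_eq_true, if_false]
      rw [PySem.Dict.get?_insert_of_ne _ _ (fun h => hx h.symm)]

lemma pvChildMap_getD (relationships : List (String × List (String × List String)))
    (x : String) :
    ((pvChildMap relationships).get? x).getD [] = pvChildren relationships x := by
  unfold pvChildMap pvChildren
  have hnd : ((PySem.Dict.ofList relationships).items.map Prod.fst).Nodup :=
    PySem.Dict.nodup_keys_ofList relationships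
  rw [pv_get?_foldl_ins (fun v => ((PySem.Dict.ofList v).get? "children").getD []) _ _ x hnd]
  cases hg : (PySem.Dict.ofList relationships).get? x with
  | none =>
    have hc : (PySem.Dict.ofList relationships).contains x = false := by
      rw [PySem.Dict.contains_eq_isSome_get?, hg]; rfl
    have hf : (PySem.Dict.ofList relationships).items.find? (fun kv => kv.1 == x) = none := by
      simp only [PySem.Dict.get?] at hg
      cases hf' : (PySem.Dict.ofList relationships).items.find? (fun kv => kv.1 == x) with
      | none => rfl
      | some kv => rw [hf'] at hg; cases hg
    simp [hf, hc]
  | some v =>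
    have hc : (PySem.Dict.ofList relationships).contains x = true := by
      rw [PySem.Dict.contains_eq_isSome_get?, hg]; rfl
    simp only [PySem.Dict.get?] at hg
    cases hf' : (PySem.Dict.ofList relationships).items.find? (fun kv => kv.1 == x) with
    | none => rw [hf'] at hg; cases hg
    | some kv =>
      rw [hf'] at hg
      simp only [Option.map_some, Option.some.injEq] at hg
      simp only [hf', Option.map_some, Option.or_some, Option.getD_some, hc, if_true, hg,
        PySem.Dict.get?, Option.getD_some]
      by_cases hch : (PySem.Dict.ofList v).contains "children" = true
      · simp [hch]
      · have hch' : (PySem.Dict.ofList v).contains "children" = false := by simpa using hch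
        have : (PySem.Dict.ofList v).get? "children" = none := by
          rw [PySem.Dict.contains_eq_isSome_get?] at hch'
          exact Option.not_isSome_iff_eq_none.mp (by simp [hch'])
        have h2 : (Option.map (fun x => x.2)
            (List.find? (fun p => p.1 == "children") (PySem.Dict.ofList v).items)) = none := by
          simpa [PySem.Dict.get?] using this
        simp [hch', h2]

-- the simulation: A's (queue, visited) vs B's (pending cursor tail, visited)
lemma pvRunA_eq_pvRunB (r : List (String × List (String × List String))) :
    ∀ (n : ℕ) (q : List String) (v : PySem.Set String) (t : List String)
      (p : List String) (w : PySem.Set String),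
      p = pvStrip (fun y => PySem.Set.contains v y) q →
      (∀ y, PySem.Set.contains w y = (PySem.Set.contains v y || decide (y ∈ p))) →
      q.length + pvPhi r v ≤ n →
      pvRunA r q v t = pvRunB (pvChildMap r) p w t := by
  intro n
  induction n with
  | zero =>
    intro q v t p w hp hw hle
    cases q with
    | nil => subst hp; simp [pvRunA, pvStrip, pvRunB]
    | cons a b => simp [List.length_cons] at hle
  | succ n ih =>
    intro q v t p w hp hw hle
    cases q with
    | nil => subst hp; simp [pvRunA, pvStrip, pvRunB]
    | cons x xs =>
      rw [pvRunA]
      by_cases hv : PySem.Set.contains v x = true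
      · rw [if_pos hv]
        have hp' : p = pvStrip (fun y => PySem.Set.contains v y) xs := by
          rw [hp, pvStrip, if_pos hv]
        exact ih xs v t p w hp' hw (by simp at hle ⊢; omega)
      · have hv' : PySem.Set.contains v x = false := by simpa using hv
        rw [if_neg hv]
        have hq : (if pvChildren r x ≠ [] then xs ++ pvChildren r x else xs)
            = xs ++ pvChildren r x := by
          split
          · rfl
          · rename_i h; rw [not_not] at h; rw [h, List.append_nil]
        simp only [hq]
        set p' := pvStrip (fun y => PySem.Set.contains v y || (y == x)) xs with hp'def
        have hpx : p = x :: p' := by rw [hp, pvStrip, if_neg hv]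
        rw [hpx, pvRunB, pvChildMap_getD]
        rcases pvEnq_spec (pvChildren r x) w p' with ⟨he1, he2⟩
        refine ih (xs ++ pvChildren r x) (PySem.Set.add v x) (t ++ [x])
          (pvEnq w p' (pvChildren r x)).2 (pvEnq w p' (pvChildren r x)).1 ?_ ?_ ?_
        · -- pending invariant
          have hxp : pvStrip (fun y => PySem.Set.contains (PySem.Set.add v x) y) xs = p' := by
            rw [hp'def]
            exact pvStrip_congr xs _ _ (fun y => pv_contains_add v x y hv')
          rw [he1, pvStrip_append, hxp]
          congr 1
          apply pvStrip_congr
          intro y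
          rw [hw y, hpx, pv_contains_add v x y hv']
          simp [List.mem_cons, beq_eq_decide, Bool.or_assoc]
        · -- visited invariant
          intro y
          rw [he2 y, he1, hw y, hpx, pv_contains_add v x y hv']
          simp [List.mem_cons, List.mem_append, beq_eq_decide, Bool.or_assoc]
        · -- measure
          have hphi := pvPhi_add r v x hv'
          simp only [List.length_cons, List.length_append] at hle ⊢
          omega

-- ===== VERDICT (by name: the statement is the Claim_ definition above) =====
theorem generate_traversal_order_py_spec : Claim_equal_generate_traversal_order_py := by
  intro root relationships _
  unfold Spec_generate_traversal_order_py generate_traversal_order_py generate_traversal_order_py_alt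
  have hof : PySem.Set.ofList [root] = PySem.Set.add PySem.Set.empty root := rfl
  rw [hof]
  apply pvRunA_eq_pvRunB relationships (1 + pvPhi relationships PySem.Set.empty)
    [root] PySem.Set.empty [] [root] (PySem.Set.add PySem.Set.empty root)
  · simp [pvStrip, PySem.Set.contains, PySem.Set.empty]
  · intro y
    rw [pv_contains_add PySem.Set.empty root y rfl]
    simp [PySem.Set.contains, PySem.Set.empty, beq_eq_decide]
  · simp
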